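-- pv_equiv track=rewrite | github.com/Edsel-Tan/dashboard | Solutions/288.py | NF
-- ===== SOURCE A (Python) =====
-- m = 10
--
-- pp = 50515093
--
-- def NF(p, q):
--     output = 0
--     s = 290797
--     t = s % p
--     for i in range(m):
--         output += t * pow(p, i, p**m)
--         output = output % (p ** m)
--         s = s ** 2
--         s = s % pp
--         t = s % p
--
--     s = 290797
--     t = s % p
--     for i in range(q+1):
--         output -= t
--         output = output % (p ** m)
--         s = s ** 2
--         s = s % pp
--         t = s % p
--
--     return (output * pow(p-1, -1, p**m)) % p**m
-- ===== SOURCE B (Python) =====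
-- pp = 50515093
--
-- def NF(p, q):
--     pm = p ** 10
--     s = 290797
--     s1 = 0  # exact Sum t_i * p^i over i < 10
--     s2 = 0  # exact Sum t_i over 0 <= i <= q
--     pw = 1
--     for i in range(max(10, q + 1)):
--         t = s % p
--         if i < 10:
--             s1 += t * pw
--             pw *= p
--         if i <= q:
--             s2 += t
--         s = s * s % pp
--     return (s1 - s2) * pow(p - 1, -1, pm) % pm
-- ===== Notes on version B (the rewrite author's own statement) =====
-- stated objective: faster
-- what changed: B fuses A's two sequential loops into one pass over the shared pseudorandom sequence, keeps exact unreduced accumulators and an incrementally maintained power of p instead of recomputing p**10 and pow(p,i,p**10) and reducing big integers every iteration, and performs a single modular reduction at the end.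
import Mathlib
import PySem

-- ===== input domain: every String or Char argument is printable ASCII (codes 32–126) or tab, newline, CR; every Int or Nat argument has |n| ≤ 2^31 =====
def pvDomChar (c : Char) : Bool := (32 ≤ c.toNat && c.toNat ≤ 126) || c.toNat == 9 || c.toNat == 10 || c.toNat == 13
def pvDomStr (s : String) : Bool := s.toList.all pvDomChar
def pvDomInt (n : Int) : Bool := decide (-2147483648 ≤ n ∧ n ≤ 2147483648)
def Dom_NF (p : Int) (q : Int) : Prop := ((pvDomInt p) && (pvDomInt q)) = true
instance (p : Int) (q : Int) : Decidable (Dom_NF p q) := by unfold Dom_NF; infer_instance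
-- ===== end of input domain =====

-- B fuses A's two passes into one loop that keeps exact (unreduced) accumulators and an
-- incrementally maintained power of p, hoisting the per-iteration p**10 / pow(p,i,p**10) /
-- big-int reductions out of the loop; one modular reduction at the end.

-- ===== PORT A =====
-- shared helper: Python `pow(a, -1, n)` (modular inverse, result in [0, n)); exact for
-- n > 0 with gcd(a, n) = 1, which holds at both call sites (gcd(p-1, p^10) = 1 for p ≠ 0).
def pyInvMod (a n : Int) : Int :=
  PySem.Int.mod (Nat.gcdA (PySem.Int.mod a n).toNat n.toNat) n

-- loop body of A's first `for i in range(m)` loop; state = (output, s, t)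
def stepA1 (p : Int) (st : Int × Int × Int) (i : Int) : Int × Int × Int :=
  let output := st.1 + st.2.2 * PySem.Int.powMod p i.toNat (p ^ 10)
  let output := PySem.Int.mod output (p ^ 10)
  let s := st.2.1 * st.2.1
  let s := PySem.Int.mod s 50515093
  (output, s, PySem.Int.mod s p)

-- loop body of A's second `for i in range(q+1)` loop; state = (output, s, t)
def stepA2 (p : Int) (st : Int × Int × Int) (_i : Int) : Int × Int × Int :=
  let output := st.1 - st.2.2
  let output := PySem.Int.mod output (p ^ 10)
  let s := st.2.1 * st.2.1
  let s := PySem.Int.mod s 50515093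
  (output, s, PySem.Int.mod s p)

def NF (p : Int) (q : Int) : Int :=
  let st1 := (PySem.List.pyRange 0 10 1).foldl (stepA1 p) (0, 290797, PySem.Int.mod 290797 p)
  let st2 := (PySem.List.pyRange 0 (q + 1) 1).foldl (stepA2 p) (st1.1, 290797, PySem.Int.mod 290797 p)
  PySem.Int.mod (st2.1 * pyInvMod (p - 1) (p ^ 10)) (p ^ 10)

-- ===== PORT B =====
-- loop body of B's single fused loop; state = (s, s1, s2, pw)
def stepB (p q : Int) (st : Int × Int × Int × Int) (i : Int) : Int × Int × Int × Int :=
  let t := PySem.Int.mod st.1 p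
  let s1 := if i < 10 then st.2.1 + t * st.2.2.2 else st.2.1
  let pw := if i < 10 then st.2.2.2 * p else st.2.2.2
  let s2 := if i ≤ q then st.2.2.1 + t else st.2.2.1
  (PySem.Int.mod (st.1 * st.1) 50515093, s1, s2, pw)

def NF_alt (p : Int) (q : Int) : Int :=
  let st := (PySem.List.pyRange 0 (max 10 (q + 1)) 1).foldl (stepB p q) (290797, 0, 0, 1)
  PySem.Int.mod ((st.2.1 - st.2.2.1) * pyInvMod (p - 1) (p ^ 10)) (p ^ 10)

-- ===== PRECONDITION & SPEC =====
-- p = 0 makes `s % p` raise ZeroDivisionError in A (and in B); everything else returns.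
def Pre_NF (p : Int) (q : Int) : Prop := p ≠ 0
instance (p : Int) (q : Int) : Decidable (Pre_NF p q) := by unfold Pre_NF; infer_instance
def pvWitness_NF : Int × Int := (3, 5)

def Spec_NF (p : Int) (q : Int) (out : Int) : Prop := out = NF_alt p q
instance (p : Int) (q : Int) (out : Int) : Decidable (Spec_NF p q out) := by unfold Spec_NF; infer_instance

-- ===== CLAIM (what is proved, stated in full; the proofs are below) =====
def Claim_equal_NF : Prop := ∀ (p : Int) (q : Int), Dom_NF p q → Pre_NF p q → Spec_NF p q (NF p q)

-- ===== LEMMAS AND PROOFS =====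

-- the shared pseudorandom sequence s and its residues t
def pvS : Nat → Int
  | 0 => 290797
  | k + 1 => PySem.Int.mod (pvS k * pvS k) 50515093

def pvT (p : Int) (k : Nat) : Int := PySem.Int.mod (pvS k) p

def pvS1 (p : Int) (n : Nat) : Int := ∑ i ∈ Finset.range n, pvT p i * p ^ i
def pvS2 (p : Int) (n : Nat) : Int := ∑ i ∈ Finset.range n, pvT p i

lemma pv_pm_pos {p : Int} (hp : p ≠ 0) : 0 < p ^ 10 :=
  lt_of_le_of_ne (by positivity) (Ne.symm (pow_ne_zero 10 hp))

lemma pv_mod_add_mul (m a b c : Int) : (a + b * (c % m)) % m = (a + b * c) % m := by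
  have hc : c % m ≡ c [ZMOD m] := Int.emod_emod_of_dvd c dvd_rfl
  exact (Int.ModEq.refl a).add ((Int.ModEq.refl b).mul hc)

lemma pv_mod_sub (m a b : Int) : (a % m - b) % m = (a - b) % m := by
  have ha : a % m ≡ a [ZMOD m] := Int.emod_emod_of_dvd a dvd_rfl
  exact ha.sub (Int.ModEq.refl b)

lemma pv_mod_mul (m a b : Int) : (a % m * b) % m = (a * b) % m := by
  have ha : a % m ≡ a [ZMOD m] := Int.emod_emod_of_dvd a dvd_rfl
  exact ha.mul (Int.ModEq.refl b)

lemma lemA1 {p : Int} (hp : p ≠ 0) (n : Nat) :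
    (List.range n).foldl (fun st (k : Nat) => stepA1 p st ((0:Int) + (k:Int))) (0, 290797, PySem.Int.mod 290797 p)
      = (pvS1 p n % p ^ 10, pvS n, pvT p n) := by
  have hpm := pv_pm_pos hp
  induction n with
  | zero => simp [pvS1, pvS, pvT]
  | succ n ih =>
    rw [List.range_succ, List.foldl_append, ih]
    simp only [List.foldl_cons, List.foldl_nil, stepA1, PySem.Int.powMod,
      PySem.Int.mod_eq_emod_of_pos hpm]
    refine Prod.ext ?_ rfl
    have h : ((0:Int) + (n:Int)).toNat = n := by omega
    rw [h, pv_mod_add_mul, Int.emod_add_emod]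
    conv_rhs => rw [pvS1, Finset.sum_range_succ]
    simp [pvS1]

lemma lemA2 {p : Int} (hp : p ≠ 0) (n : Nat) :
    (List.range n).foldl (fun st (k : Nat) => stepA2 p st ((0:Int) + (k:Int)))
        (pvS1 p 10 % p ^ 10, 290797, PySem.Int.mod 290797 p)
      = ((pvS1 p 10 - pvS2 p n) % p ^ 10, pvS n, pvT p n) := by
  have hpm := pv_pm_pos hp
  induction n with
  | zero => simp [pvS2, pvS, pvT]
  | succ n ih =>
    rw [List.range_succ, List.foldl_append, ih]
    simp only [List.foldl_cons, List.foldl_nil, stepA2, PySem.Int.mod_eq_emod_of_pos hpm]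
    rw [pv_mod_sub, sub_sub]
    conv_rhs => rw [pvS2, Finset.sum_range_succ]
    simp [pvS2, pvS, pvT]

lemma lemB {p q : Int} (n : Nat) :
    (List.range n).foldl (fun st (k : Nat) => stepB p q st ((0:Int) + (k:Int))) (290797, 0, 0, 1)
      = (pvS n, pvS1 p (min n 10), pvS2 p (min n (q + 1).toNat), p ^ (min n 10)) := by
  induction n with
  | zero => simp [pvS, pvS1, pvS2]
  | succ n ih =>
    rw [List.range_succ, List.foldl_append, ih]
    simp only [List.foldl_cons, List.foldl_nil, stepB]
    refine Prod.ext rfl (Prod.ext ?_ (Prod.ext ?_ ?_))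
    · by_cases hn : ((0:Int) + (n:Int) < 10)
      · have h1 : min n 10 = n := by omega
        have h2 : min (n + 1) 10 = n + 1 := by omega
        simp only [if_pos hn, h1, h2]
        conv_rhs => rw [pvS1, Finset.sum_range_succ]
        rfl
      · have h1 : min n 10 = 10 := by omega
        have h2 : min (n + 1) 10 = 10 := by omega
        simp only [if_neg hn, h1, h2]
    · by_cases hq : ((0:Int) + (n:Int) ≤ q)
      · have h1 : min n (q + 1).toNat = n := by omega
        have h2 : min (n + 1) (q + 1).toNat = n + 1 := by omega
        simp only [if_pos hq, h1, h2]
        conv_rhs => rw [pvS2, Finset.sum_range_succ]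
        rfl
      · have h1 : min n (q + 1).toNat = (q + 1).toNat := by omega
        have h2 : min (n + 1) (q + 1).toNat = (q + 1).toNat := by omega
        simp only [if_neg hq, h1, h2]
    · by_cases hn : ((0:Int) + (n:Int) < 10)
      · have h1 : min n 10 = n := by omega
        have h2 : min (n + 1) 10 = n + 1 := by omega
        simp only [if_pos hn, h1, h2]
        rw [pow_succ]
      · have h1 : min n 10 = 10 := by omega
        have h2 : min (n + 1) 10 = 10 := by omega
        simp only [if_neg hn, h1, h2]

-- ===== VERDICT (by name: the statement is the Claim_ definition above) =====
theorem NF_spec : Claim_equal_NF := by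
  intro p q _hdom hp
  have hp' : p ≠ 0 := hp
  have hpm := pv_pm_pos hp'
  show NF p q = NF_alt p q
  simp only [NF, NF_alt, PySem.List.pyRange_one, List.foldl_map, sub_zero]
  have h10 : ((10 : Int)).toNat = 10 := rfl
  rw [h10, lemA1 hp', lemA2 hp', lemB]
  have hN1 : min ((max 10 (q + 1)).toNat) 10 = 10 := by omega
  have hN2 : min ((max 10 (q + 1)).toNat) (q + 1).toNat = (q + 1).toNat := by omega
  rw [hN1, hN2, PySem.Int.mod_eq_emod_of_pos hpm, PySem.Int.mod_eq_emod_of_pos hpm, pv_mod_mul]
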